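-- pv_equiv track=rewrite | github.com/pimang62/Codingtest | programmers/Lv.2/moum.py | solution
-- ===== SOURCE A (Python) =====
-- def solution(word):
--     result = []   # 완전 탐색 리스트
--     w = 'AEIOU'
--     string = ''   # 문자열 초기화
--     def dfs(cnt, string):
--         if cnt == 3:
--             #result.append(string)  # 길이가 5인 것만
--             return
--         for i in range(len(w)):
--             # string += w[i] !! X
--             result.append(string + w[i])
--             dfs(cnt + 1, string + w[i])
--     dfs(0, string = '')
--     return result.index(word) + 1
-- ===== SOURCE B (Python) =====
-- def solution(word):
--     # Closed-form rank: each vowel at depth i roots a subtree of (5^(3-i)-1)/4 words.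
--     if not 1 <= len(word) <= 3:
--         raise ValueError(f"{word!r} is not in list")
--     return sum('AEIOU'.index(c) * w + 1 for c, w in zip(word, (31, 6, 1)))
-- ===== Notes on version B (the rewrite author's own statement) =====
-- stated objective: simpler
-- what changed: Replaces the DFS enumeration of all 155 vowel strings plus a linear list.index scan by a direct base-5 positional formula with subtree weights 31/6/1.
import Mathlib
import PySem

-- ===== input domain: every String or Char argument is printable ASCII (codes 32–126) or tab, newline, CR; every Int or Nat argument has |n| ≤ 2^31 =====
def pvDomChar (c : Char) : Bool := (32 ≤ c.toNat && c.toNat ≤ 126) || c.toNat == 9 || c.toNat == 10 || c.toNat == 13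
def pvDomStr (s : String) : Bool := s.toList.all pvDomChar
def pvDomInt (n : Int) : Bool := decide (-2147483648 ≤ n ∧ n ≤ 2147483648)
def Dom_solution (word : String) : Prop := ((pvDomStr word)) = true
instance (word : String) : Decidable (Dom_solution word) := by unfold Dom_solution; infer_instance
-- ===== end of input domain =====

-- B replaces A's DFS enumeration + list.index scan by a closed base-5 positional formula (objective: simpler).

-- ===== PORT A =====
-- Python strings are ported as List Char (PySem convention); '+' on strings is List append.
def pyVowels : List Char := ['A', 'E', 'I', 'O', 'U']

-- A's nested dfs: fuel = 3 - cnt; the 'if cnt == 3: return' is the fuel-0 case.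
def dfsA : Nat → List Char → List (List Char) → List (List Char)
  | 0, _, result => result
  | n + 1, string, result =>
      (List.range pyVowels.length).foldl
        (fun res i =>
          let s := string ++ [pyVowels.getD i 'A']   -- string + w[i]
          dfsA n s (res ++ [s]))
        result

def solution (word : String) : Int :=
  let result := dfsA 3 [] []
  match PySem.List.index? result word.toList with   -- result.index(word); none = ValueError, excluded by Pre_
  | some i => i + 1
  | none => 0

-- ===== PORT B =====
-- 'AEIOU'.index(c); none = ValueError, excluded by Pre_
def vowelIdx (c : Char) : Int := (PySem.List.index? pyVowels c).getD 0

def solution_alt (word : String) : Int :=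
  let cs := word.toList
  if 1 ≤ cs.length ∧ cs.length ≤ 3 then
    (cs.zip [31, 6, 1]).foldl (fun acc cw => acc + vowelIdx cw.1 * cw.2 + 1) 0
  else 0   -- Python B raises ValueError here, excluded by Pre_

-- ===== PRECONDITION & SPEC =====
-- Pre_ excludes exactly the inputs on which A's result.index(word) raises ValueError:
-- word must be a string of length 1..3 made only of the vowels AEIOU.
def Pre_solution (word : String) : Prop :=
  1 ≤ word.toList.length ∧ word.toList.length ≤ 3 ∧ word.toList.all (pyVowels.contains ·) = true
instance (word : String) : Decidable (Pre_solution word) := by unfold Pre_solution; infer_instance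

def pvWitness_solution : String := "AIO"

def Spec_solution (word : String) (out : Int) : Prop := out = solution_alt word
instance (word : String) (out : Int) : Decidable (Spec_solution word out) := by unfold Spec_solution; infer_instance

-- ===== CLAIM (what is proved, stated in full; the proofs are below) =====
def Claim_equal_solution : Prop := ∀ (word : String), Dom_solution word → Pre_solution word → Spec_solution word (solution word)

-- ===== LEMMAS AND PROOFS =====
set_option maxRecDepth 4000
set_option maxHeartbeats 1000000

-- The whole valid domain is finite (155 words); the key lemma is a single decidable check over it.
def allValid : List (List Char) :=
  pyVowels.flatMap (fun a =>
    [a] :: pyVowels.flatMap (fun b =>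
      [a, b] :: pyVowels.map (fun c => [a, b, c])))

lemma key : ∀ l ∈ allValid,
    (match PySem.List.index? (dfsA 3 [] []) l with | some i => (i : Int) + 1 | none => 0) =
    (l.zip ([31, 6, 1] : List Int)).foldl (fun acc cw => acc + vowelIdx cw.1 * cw.2 + 1) 0 := by
  decide

lemma mem_allValid (l : List Char) (h1 : 1 ≤ l.length) (h2 : l.length ≤ 3)
    (h3 : ∀ c ∈ l, c ∈ pyVowels) : l ∈ allValid := by
  match l with
  | [] => simp at h1
  | [a] =>
      have ha := h3 a (by simp)
      fin_cases ha <;> decide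
  | [a, b] =>
      have ha := h3 a (by simp)
      have hb := h3 b (by simp)
      fin_cases ha <;> fin_cases hb <;> decide
  | [a, b, c] =>
      have ha := h3 a (by simp)
      have hb := h3 b (by simp)
      have hc := h3 c (by simp)
      fin_cases ha <;> fin_cases hb <;> fin_cases hc <;> decide
  | _ :: _ :: _ :: _ :: _ => simp at h2; omega

-- ===== VERDICT (by name: the statement is the Claim_ definition above) =====
theorem solution_spec : Claim_equal_solution := by
  intro word _ ⟨h1, h2, h3⟩
  have h3' : ∀ c ∈ word.toList, c ∈ pyVowels := by simpa using h3
  unfold Spec_solution solution solution_alt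
  rw [if_pos ⟨h1, h2⟩]
  exact key word.toList (mem_allValid word.toList h1 h2 h3')
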